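-- pv_equiv track=rewrite | github.com/Daniel-W1/Competitive-Programming | 2086-minimum-number-of-buckets-required-to-collect-rainwater-from-houses/2086-minimum-number-of-buckets-required-to-collect-rainwater-from-houses.py | minimumBuckets
-- ===== SOURCE A (Python) =====
-- def minimumBuckets(street: str) -> int:
--     bucketCount, lastBucketPostion = 0, -1
--     length = len(street)
--     for i, ch in enumerate(street):
--         if ch == 'H':
--             if i > 0 and lastBucketPostion == i - 1:
--                 continue
--
--             if i + 1 < length and street[i + 1] == '.':
--                 lastBucketPostion = i + 1
--                 bucketCount += 1
--             elif i - 1 >= 0 and street[i - 1] == '.':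
--                 lastBucketPostion = i - 1
--                 bucketCount += 1
--             else:
--                 return -1
--
--     return bucketCount
-- ===== SOURCE B (Python) =====
-- def minimumBuckets(street: str) -> int:
--     n = len(street)
--     # feasibility: every house must have an empty cell next to it
--     i = 0
--     while i < n:
--         if street[i] == 'H':
--             if not ((i > 0 and street[i - 1] == '.') or
--                     (i + 1 < n and street[i + 1] == '.')):
--                 return -1
--         i += 1
--     # minimum = houses - (number of disjoint 'H.H' blocks, greedy left-to-right),
--     # since each such block lets two houses share one bucket
--     houses = sum(ch == 'H' for ch in street)
--     shared = 0
--     i = 0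
--     while i + 2 < n:
--         if street[i] == 'H' and street[i + 1] == '.' and street[i + 2] == 'H':
--             shared += 1
--             i += 3
--         else:
--             i += 1
--     return houses - shared
-- ===== Notes on version B (the rewrite author's own statement) =====
-- stated objective: alternative
-- what changed: Replaces A's stateful single-pass greedy (prefer-right bucket with a remembered lastBucketPosition) by a counting formula in staged passes: a feasibility scan (every house needs an adjacent '.'), a count of houses, and a greedy scan for disjoint 'H.H' blocks; the answer is houses minus shared blocks.
import Mathlib
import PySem

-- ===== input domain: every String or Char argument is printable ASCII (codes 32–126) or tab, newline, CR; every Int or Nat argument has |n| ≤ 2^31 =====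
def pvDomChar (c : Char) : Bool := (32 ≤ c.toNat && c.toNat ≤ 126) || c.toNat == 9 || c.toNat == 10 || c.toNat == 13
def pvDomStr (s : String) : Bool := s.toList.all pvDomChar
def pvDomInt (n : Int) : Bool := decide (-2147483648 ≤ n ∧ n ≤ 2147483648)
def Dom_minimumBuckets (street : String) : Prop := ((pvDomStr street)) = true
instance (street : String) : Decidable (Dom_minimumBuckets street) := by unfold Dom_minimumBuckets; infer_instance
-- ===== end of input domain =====

-- B replaces A's stateful greedy pass by a counting formula in staged passes:
-- feasibility scan, house count, and a greedy scan for disjoint 'H.H' blocks;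
-- answer = houses - shared blocks. Same O(n) cost, a different algorithm.

-- ===== PORT A =====
-- the for-loop over enumerate(street) with state (bucketCount, lastBucketPostion); early `return -1` exits
def minimumBucketsLoopA (s : List Char) (len : Int) :
    List (Int × Char) → Int → Int → Int
  | [], bucketCount, _ => bucketCount
  | (i, ch) :: rest, bucketCount, lastBucketPostion =>
    if ch = 'H' then
      if i > 0 ∧ lastBucketPostion = i - 1 then
        minimumBucketsLoopA s len rest bucketCount lastBucketPostion
      else if i + 1 < len ∧ PySem.List.pyGet? s (i + 1) = some '.' then
        minimumBucketsLoopA s len rest (bucketCount + 1) (i + 1)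
      else if i - 1 ≥ 0 ∧ PySem.List.pyGet? s (i - 1) = some '.' then
        minimumBucketsLoopA s len rest (bucketCount + 1) (i - 1)
      else -1
    else minimumBucketsLoopA s len rest bucketCount lastBucketPostion

def minimumBuckets (street : String) : Int :=
  minimumBucketsLoopA street.toList (street.toList.length : Int)
    (PySem.List.enumerate street.toList 0) 0 (-1)

-- ===== PORT B =====
-- Source B pass 1: the `while i < n` feasibility walk; true = a house with no '.' neighbour was found (return -1)
def feasScan (s : List Char) (i : Nat) : Bool :=
  if h : i < s.length then
    if s[i] = 'H' ∧ ¬((0 < i ∧ s[i - 1]? = some '.') ∨ (i + 1 < s.length ∧ s[i + 1]? = some '.')) then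
      true
    else feasScan s (i + 1)
  else false
termination_by s.length - i

-- Source B pass 3: the `while i + 2 < n` greedy scan counting disjoint 'H.H' blocks
def matchScan (s : List Char) (i : Nat) : Int :=
  if i + 2 < s.length then
    if s[i]? = some 'H' ∧ s[i + 1]? = some '.' ∧ s[i + 2]? = some 'H' then
      1 + matchScan s (i + 3)
    else matchScan s (i + 1)
  else 0
termination_by s.length - i

-- sum(ch == 'H' for ch in street) is List.count (exact: True counts as 1, False as 0)
def minimumBuckets_alt (street : String) : Int :=
  let s := street.toList
  if feasScan s 0 then -1
  else (s.count 'H' : Int) - matchScan s 0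

-- ===== PRECONDITION & SPEC =====
def Spec_minimumBuckets (street : String) (out : Int) : Prop := out = minimumBuckets_alt street
instance (street : String) (out : Int) : Decidable (Spec_minimumBuckets street out) := by unfold Spec_minimumBuckets; infer_instance

-- ===== CLAIM (what is proved, stated in full; the proofs are below) =====
def Claim_equal_minimumBuckets : Prop := ∀ (street : String), Dom_minimumBuckets street → Spec_minimumBuckets street (minimumBuckets street)

-- ===== LEMMAS AND PROOFS =====

-- the invariant: entering index i, the remembered bucket position can never again trigger A's `continue`
def Inactive (last : Int) (i : Nat) : Prop := last = -1 ∨ last + 2 ≤ (i : Int)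

-- one no-find step of the 'H.H' scan
theorem matchScan_skip (s : List Char) (i : Nat)
    (h : ¬(i + 2 < s.length ∧ s[i]? = some 'H' ∧ s[i + 1]? = some '.' ∧ s[i + 2]? = some 'H')) :
    matchScan s i = matchScan s (i + 1) := by
  rw [matchScan]
  by_cases h2 : i + 2 < s.length
  · rw [if_pos h2, if_neg (fun ht => h ⟨h2, ht⟩)]
  · rw [if_neg h2, matchScan, if_neg (by omega)]

-- one no-bad step of the feasibility scan
theorem feasScan_cont (s : List Char) (i : Nat) (h : i < s.length)
    (hok : ¬(s[i] = 'H' ∧ ¬((0 < i ∧ s[i - 1]? = some '.') ∨ (i + 1 < s.length ∧ s[i + 1]? = some '.')))) :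
    feasScan s i = feasScan s (i + 1) := by
  rw [feasScan, dif_pos h, if_neg hok]

-- the suffix house count peels one character
theorem count_drop_step (s : List Char) (i : Nat) (h : i < s.length) :
    ((s.drop i).count 'H' : Int)
      = (if s[i] = 'H' then 1 else 0) + ((s.drop (i + 1)).count 'H' : Int) := by
  rw [List.drop_eq_getElem_cons h, List.count_cons]
  by_cases hH : s[i] = 'H'
  · simp [hH]
    omega
  · simp [hH]

-- A's loop from a clean position i equals B's staged formula on the suffix from i
theorem main_lemma (s : List Char) :
    ∀ (n i : Nat), s.length - i = n → ∀ (count last : Int), Inactive last i →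
      minimumBucketsLoopA s (s.length : Int)
          (PySem.List.enumerate (s.drop i) (i : Int)) count last
        = if feasScan s i then -1
          else count + ((s.drop i).count 'H' : Int) - matchScan s i := by
  intro n
  induction n using Nat.strong_induction_on with
  | _ n ih =>
    intro i hn count last hinv
    by_cases hi : i < s.length
    · rw [List.drop_eq_getElem_cons hi, PySem.List.enumerate_cons]
      have hget1 : PySem.List.pyGet? s ((i : Int) + 1) = s[i + 1]? := by
        have e : ((i : Int) + 1) = ((i + 1 : Nat) : Int) := by push_cast; ring
        rw [e, PySem.List.pyGet?_natCast]
      by_cases hH : s[i] = 'H'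
      · simp only [minimumBucketsLoopA]
        rw [if_pos hH]
        have hcont : ¬((i : Int) > 0 ∧ last = (i : Int) - 1) := by
          rcases hinv with h | h <;> (rintro ⟨h1, h2⟩; omega)
        rw [if_neg hcont]
        by_cases hr : ((i : Int) + 1 < (s.length : Int) ∧
            PySem.List.pyGet? s ((i : Int) + 1) = some '.')
        · -- right bucket: A places it and walks through i+1; B's scans agree step by step
          rw [if_pos hr]
          have hi1 : i + 1 < s.length := by exact_mod_cast hr.1
          have hdot? : s[i + 1]? = some '.' := by rw [← hget1]; exact hr.2
          have hdot : s[i + 1] = '.' := by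
            have h2 := hdot?; rw [List.getElem?_eq_getElem hi1] at h2; injection h2
          have hgood : ¬(s[i] = 'H' ∧ ¬((0 < i ∧ s[i - 1]? = some '.') ∨
              (i + 1 < s.length ∧ s[i + 1]? = some '.'))) := by
            rintro ⟨_, hng⟩; exact hng (Or.inr ⟨hi1, hdot?⟩)
          have hf1 : feasScan s i = feasScan s (i + 1) := feasScan_cont s i hi hgood
          have hf2 : feasScan s (i + 1) = feasScan s (i + 2) := by
            apply feasScan_cont s (i + 1) hi1
            rintro ⟨hc, _⟩; rw [hdot] at hc; exact absurd hc (by decide)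
          -- A's step at i+1: the character is '.', not 'H'
          rw [List.drop_eq_getElem_cons hi1, PySem.List.enumerate_cons]
          simp only [minimumBucketsLoopA]
          rw [if_neg (show ¬(s[i + 1] = 'H') by rw [hdot]; decide)]
          by_cases hi2 : i + 2 < s.length
          · rw [show s.drop (i + 1 + 1) = s.drop (i + 2) from rfl,
                show (i : Int) + 1 + 1 = ((i + 2 : Nat) : Int) by push_cast; ring]
            rw [List.drop_eq_getElem_cons hi2, PySem.List.enumerate_cons]
            have ih3 :
                minimumBucketsLoopA s (s.length : Int)
                  (PySem.List.enumerate (s.drop (i + 3)) ((i + 3 : Nat) : Int))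
                  (count + 1) ((i : Int) + 1)
                = if feasScan s (i + 3) then -1
                  else (count + 1) + ((s.drop (i + 3)).count 'H' : Int) - matchScan s (i + 3) :=
              ih (s.length - (i + 3)) (by omega) (i + 3) rfl (count + 1) ((i : Int) + 1)
                (Or.inr (by push_cast; omega))
            rw [show ((i + 3 : Nat) : Int) = ((i + 2 : Nat) : Int) + 1 by push_cast; ring,
                show i + 3 = i + 2 + 1 from by omega] at ih3
            by_cases hH2 : s[i + 2] = 'H'
            · -- an 'H.H' block: A's continue at i+2 ~ B's shared-bucket match
              simp only [minimumBucketsLoopA]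
              rw [if_pos hH2,
                  if_pos (show ((i + 2 : Nat) : Int) > 0 ∧ (i : Int) + 1 = ((i + 2 : Nat) : Int) - 1 by
                    constructor <;> push_cast <;> omega)]
              rw [ih3]
              have hf3 : feasScan s (i + 2) = feasScan s (i + 2 + 1) := by
                apply feasScan_cont s (i + 2) hi2
                rintro ⟨_, hng⟩
                exact hng (Or.inl ⟨by omega, by
                  rw [show i + 2 - 1 = i + 1 from rfl, List.getElem?_eq_getElem hi1, hdot]⟩)
              have hm : matchScan s i = 1 + matchScan s (i + 3) := by
                rw [matchScan, if_pos hi2,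
                    if_pos ⟨List.getElem?_eq_getElem hi ▸ congrArg some hH,
                           hdot?, List.getElem?_eq_getElem hi2 ▸ congrArg some hH2⟩]
              rw [hf1, hf2, hf3, hm, show i + 3 = i + 2 + 1 by omega]
              by_cases hf : feasScan s (i + 2 + 1) = true
              · simp [hf]
              · simp only [hf]
                simp [hH, hdot, hH2]
                omega
            · -- no second house: plain bucket on the right, all scans advance by one
              simp only [minimumBucketsLoopA]
              rw [if_neg hH2, ih3]
              have hf3 : feasScan s (i + 2) = feasScan s (i + 2 + 1) := by
                apply feasScan_cont s (i + 2) hi2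
                rintro ⟨hc, _⟩; exact hH2 hc
              have hm1 : matchScan s i = matchScan s (i + 1) := by
                apply matchScan_skip
                rintro ⟨_, _, _, h3⟩
                rw [List.getElem?_eq_getElem hi2] at h3
                exact hH2 (by injection h3)
              have hm2 : matchScan s (i + 1) = matchScan s (i + 2) := by
                apply matchScan_skip
                rintro ⟨_, h1, _⟩
                rw [List.getElem?_eq_getElem hi1, hdot] at h1
                exact absurd h1 (by decide)
              have hm3 : matchScan s (i + 2) = matchScan s (i + 2 + 1) := by
                apply matchScan_skip
                rintro ⟨_, h1, _⟩
                rw [List.getElem?_eq_getElem hi2] at h1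
                exact hH2 (by injection h1)
              rw [hf1, hf2, hf3, hm1, hm2, hm3]
              by_cases hf : feasScan s (i + 2 + 1) = true
              · simp [hf]
              · simp only [hf]
                simp [hH, hdot]
                have hc3 := count_drop_step s (i + 2) hi2
                rw [if_neg hH2] at hc3
                omega
          · -- i+2 is past the end: the street ends 'H.'
            have hlen : s.length = i + 2 := by omega
            have hemp : s.drop (i + 1 + 1) = ([] : List Char) := by
              apply List.drop_eq_nil_of_le; omega
            rw [hemp, PySem.List.enumerate_nil]
            have hf2' : feasScan s (i + 2) = false := by
              rw [feasScan, dif_neg (by omega)]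
            have hm : matchScan s i = 0 := by rw [matchScan, if_neg (by omega)]
            rw [show minimumBucketsLoopA s (s.length : Int) [] (count + 1) ((i : Int) + 1)
                  = count + 1 from rfl]
            rw [hf1, hf2, hf2', if_neg (by decide), hm]
            simp [hH, hdot]
        · rw [if_neg hr]
          by_cases hl : ((i : Int) - 1 ≥ 0 ∧ PySem.List.pyGet? s ((i : Int) - 1) = some '.')
          · -- bucket on the left: count it, every scan advances by one
            have hi1 : 1 ≤ i := by rcases hl with ⟨h1, _⟩; omega
            have hgl : PySem.List.pyGet? s ((i : Int) - 1) = s[i - 1]? := by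
              rw [show (i : Int) - 1 = ((i - 1 : Nat) : Int) by omega, PySem.List.pyGet?_natCast]
            have hldot : s[i - 1]? = some '.' := by rw [← hgl]; exact hl.2
            rw [if_pos hl]
            have ih1 :
                minimumBucketsLoopA s (s.length : Int)
                  (PySem.List.enumerate (s.drop (i + 1)) ((i + 1 : Nat) : Int))
                  (count + 1) ((i : Int) - 1)
                = if feasScan s (i + 1) then -1
                  else (count + 1) + ((s.drop (i + 1)).count 'H' : Int) - matchScan s (i + 1) :=
              ih (s.length - (i + 1)) (by omega) (i + 1) rfl (count + 1) ((i : Int) - 1)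
                (Or.inr (by omega))
            rw [show ((i + 1 : Nat) : Int) = (i : Int) + 1 by push_cast; ring] at ih1
            rw [ih1]
            have hf1 : feasScan s i = feasScan s (i + 1) := by
              apply feasScan_cont s i hi
              rintro ⟨_, hng⟩; exact hng (Or.inl ⟨by omega, hldot⟩)
            have hm1 : matchScan s i = matchScan s (i + 1) := by
              apply matchScan_skip
              rintro ⟨h2, _, hd, _⟩
              exact hr ⟨by exact_mod_cast (by omega : i + 1 < s.length), by rw [hget1]; exact hd⟩
            rw [hf1, hm1]
            by_cases hf : feasScan s (i + 1) = true
            · simp [hf]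
            · simp only [hf]
              simp [hH]
              omega
          · -- no empty cell on either side: both return -1
            rw [if_neg hl]
            have hbad : feasScan s i = true := by
              rw [feasScan, dif_pos hi, if_pos ?_]
              refine ⟨hH, ?_⟩
              rintro (⟨hpos, hld⟩ | ⟨hlt, hrd⟩)
              · exact hl ⟨by omega, by
                  rw [show (i : Int) - 1 = ((i - 1 : Nat) : Int) by omega,
                      PySem.List.pyGet?_natCast]; exact hld⟩
              · exact hr ⟨by exact_mod_cast hlt, by rw [hget1]; exact hrd⟩
            rw [hbad, if_pos rfl]
      · -- not a house: every pass just advances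
        simp only [minimumBucketsLoopA]
        rw [if_neg hH]
        rw [show (i : Int) + 1 = ((i + 1 : Nat) : Int) by push_cast; ring]
        rw [ih (s.length - (i + 1)) (by omega) (i + 1) rfl count last
          (by rcases hinv with h | h
              · exact Or.inl h
              · exact Or.inr (by push_cast at *; omega))]
        have hf1 : feasScan s i = feasScan s (i + 1) := by
          apply feasScan_cont s i hi
          rintro ⟨hc, _⟩; exact hH hc
        have hm1 : matchScan s i = matchScan s (i + 1) := by
          apply matchScan_skip
          rintro ⟨_, h1, _⟩
          rw [List.getElem?_eq_getElem hi] at h1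
          exact hH (by injection h1)
        rw [hf1, hm1]
        by_cases hf : feasScan s (i + 1) = true
        · simp [hf]
        · have hb : (s[i] == 'H') = false := beq_eq_false_iff_ne.mpr hH
          simp only [hf, List.count_cons, hb]
          simp
    · -- past the end: A returns its count, the scans return nothing
      have hemp : s.drop i = ([] : List Char) := List.drop_eq_nil_of_le (by omega)
      rw [hemp, PySem.List.enumerate_nil]
      have hf : feasScan s i = false := by rw [feasScan, dif_neg hi]
      have hm : matchScan s i = 0 := by rw [matchScan, if_neg (by omega)]
      rw [hf, if_neg (by decide), hm]
      simp [minimumBucketsLoopA]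

-- ===== VERDICT (by name: the statement is the Claim_ definition above) =====
theorem minimumBuckets_spec : Claim_equal_minimumBuckets := by
  intro street _
  unfold Spec_minimumBuckets minimumBuckets minimumBuckets_alt
  have h := main_lemma street.toList (street.toList.length - 0) 0 rfl 0 (-1) (Or.inl rfl)
  simp only [List.drop_zero, Nat.cast_zero] at h
  rw [h]
  by_cases hf : feasScan street.toList 0
  · simp [hf]
  · simp [hf]
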